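-- pv_equiv track=rewrite | github.com/jocphox/flashtrans | getnewrow.py | newrow
-- ===== SOURCE A (Python) =====
-- def isTitle(ss):
--     if ss[0].isupper() and "." not in ss:
--         return True
--     elif ss[0].isupper() and "." in ss and len((ss.split(".")[0]).split(" "))>2:
--         return True
--     else:
--         return False
--
-- def newrow(lst,pos=1):
--     if pos<len(lst) and isTitle(lst[pos]):
--         lst[pos:pos+1]=["\n",lst[pos]]
--         newrow(lst,pos+2)
--     elif pos<len(lst):
--         newrow(lst,pos+1)
--     else:
--         pass
--     return lst
-- ===== SOURCE B (Python) =====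
-- # B: one slice-assignment pass — rebuild the tail lst[pos:] with a flat comprehension
-- # that puts "\n" before each title, instead of A's rescanning recursion with repeated
-- # slice splices; still mutates lst in place and returns the same object.
-- def isTitle(ss):
--     if ss[0].isupper() and "." not in ss:
--         return True
--     elif ss[0].isupper() and "." in ss and len((ss.split(".")[0]).split(" "))>2:
--         return True
--     else:
--         return False
--
-- def newrow(lst, pos=1):
--     lst[pos:] = [x for s in lst[pos:] for x in (["\n", s] if isTitle(s) else [s])]
--     return lst
-- ===== Notes on version B (the rewrite author's own statement) =====
-- stated objective: idiomatic
-- what changed: A rescans the list with a recursion that splices ['\n', x] in via lst[pos:pos+1] assignments and re-walks past each insertion; B rebuilds the tail in one flat comprehension and assigns it with a single slice assignment lst[pos:] = ..., still mutating in place.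
-- intended difference: For negative pos with a title string present, A's slice-assignment index wraparound duplicates title elements and rescans the whole list (e.g. newrow(['a','B'],-1) == ['a','\n','\n','B','\n','B']), while B inserts '\n' before the titles of the suffix lst[pos:] only (['a','\n','B']), which is the intended meaning of the start position under Python's negative indexing. — e.g. on newrow(["a", "B"], -1): A returns ["a", "\n", "\n", "B", "\n", "B"], B returns ["a", "\n", "B"]
-- outside the precondition, e.g. on newrow(['', 'B'], -1): A returns ['', '\n', '\n', 'B', '\n', 'B'], B returns ['', '\n', 'B']
import Mathlib
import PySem

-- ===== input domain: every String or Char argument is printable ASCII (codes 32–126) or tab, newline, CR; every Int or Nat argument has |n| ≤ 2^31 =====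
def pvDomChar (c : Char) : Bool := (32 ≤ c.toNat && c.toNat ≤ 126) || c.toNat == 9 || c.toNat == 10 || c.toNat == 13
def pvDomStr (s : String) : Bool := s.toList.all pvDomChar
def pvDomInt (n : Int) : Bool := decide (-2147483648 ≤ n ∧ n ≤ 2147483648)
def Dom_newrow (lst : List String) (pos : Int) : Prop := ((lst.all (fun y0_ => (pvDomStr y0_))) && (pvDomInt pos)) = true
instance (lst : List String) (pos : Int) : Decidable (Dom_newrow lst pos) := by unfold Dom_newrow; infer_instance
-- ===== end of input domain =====

-- B rebuilds the tail lst[pos:] with one flat map instead of A's rescanning splice recursion;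
-- both Pythons mutate lst in place and return it — the theorems are about the returned value.

-- ===== PORT A =====
-- shared helper: the module-level isTitle, used verbatim by both Pythons.
-- 'none' = Python's IndexError on ss[0] (ss empty); ss.split(".") with a non-empty
-- separator is always 'some' of a non-empty list, so getD/headD defaults never fire.
def dotHead (ss : String) : String := ((PySem.Str.split? ss ".").getD []).headD ""

def isTitleO (ss : String) : Option Bool :=
  match PySem.Str.pyGet? ss 0 with
  | none => none
  | some c0 =>
    if PySem.Chars.isupper c0 && !(PySem.Str.isIn "." ss) then some true
    else if PySem.Chars.isupper c0 && PySem.Str.isIn "." ss &&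
            decide (2 < ((PySem.Str.split? (dotHead ss) " ").getD []).length) then some true
    else some false

-- exact CPython semantics of the slice assignment lst[pos:pos+1] = v:
-- clamp both bounds (negative bounds count from the end), then j = max i j'.
def spliceLo (n : Nat) (pos : Int) : Nat :=
  if pos < 0 then ((n : Int) + pos).toNat else (min pos (n : Int)).toNat

def spliceHi (n : Nat) (pos : Int) : Nat :=
  max (spliceLo n pos)
    (if pos + 1 < 0 then ((n : Int) + pos + 1).toNat else (min (pos + 1) (n : Int)).toNat)

def pySplice (lst : List String) (pos : Int) (v : List String) : List String :=
  lst.take (spliceLo lst.length pos) ++ v ++ lst.drop (spliceHi lst.length pos)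

-- A's recursion, with fuel only to make it total; newrow passes fuel that provably
-- exceeds the number of recursive calls, so the fuel-0 branch is never reached there.
-- The 'none' branches are Python's IndexError (excluded by Pre_newrow).
def newrowLoop : Nat → List String → Int → List String
  | 0, lst, _ => lst
  | fuel + 1, lst, pos =>
    if pos < (lst.length : Int) then
      match PySem.List.pyGet? lst pos with
      | none => lst
      | some s =>
        match isTitleO s with
        | none => lst
        | some true => newrowLoop fuel (pySplice lst pos ["\n", s]) (pos + 2)
        | some false => newrowLoop fuel lst (pos + 1)
    else lst

def newrow (lst : List String) (pos : Int) : List String :=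
  newrowLoop (lst.length + pos.natAbs + 2) lst pos

-- ===== PORT B =====
-- the comprehension's per-element chunk; '_' covers some false and (unreachably inside
-- Pre_newrow) none, where Python's isTitle raises.
def titleChunk (s : String) : List String :=
  match isTitleO s with
  | some true => ["\n", s]
  | _ => [s]

-- lst[:pos] ++ flattened chunks of lst[pos:]  (the slice assignment lst[pos:] = …)
def newrow_alt (lst : List String) (pos : Int) : List String :=
  PySem.List.slice lst none (some pos) ++ (PySem.List.slice lst (some pos) none).flatMap titleChunk

-- ===== PRECONDITION & SPEC =====
-- A raises IndexError when its scan reaches an empty string, and on pos < -len(lst) (and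
-- pos < 0 with lst empty). For negative pos A's wandering scan can reach any index, so
-- Pre_ conservatively requires every element non-empty there; this excludes a few
-- negative-pos inputs (an empty string A's path happens to skip) on which A still returns.
def Pre_newrow (lst : List String) (pos : Int) : Prop :=
  if pos < 0 then lst ≠ [] ∧ -(lst.length : Int) ≤ pos ∧ ∀ s ∈ lst, s ≠ ""
  else ∀ s ∈ lst.drop pos.toNat, s ≠ ""
instance (lst : List String) (pos : Int) : Decidable (Pre_newrow lst pos) := by
  unfold Pre_newrow; infer_instance

def pvWitness_newrow : List String × Int := (["x", "Hi", "a.b"], 1)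

-- For negative pos with a title string present, A's slice-assignment index wraparound
-- duplicates title elements and rescans the whole list; B inserts "\n" before the titles
-- of the suffix lst[pos:] only, the intended meaning of the start position under Python's
-- negative indexing.
def D_newrow (lst : List String) (pos : Int) : Prop :=
  pos < 0 ∧ ∃ s ∈ lst, isTitleO s = some true
instance (lst : List String) (pos : Int) : Decidable (D_newrow lst pos) := by
  unfold D_newrow; infer_instance

def Spec_newrow (lst : List String) (pos : Int) (out : List String) : Prop :=
  ¬ D_newrow lst pos → out = newrow_alt lst pos
instance (lst : List String) (pos : Int) (out : List String) : Decidable (Spec_newrow lst pos out) := by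
  unfold Spec_newrow; infer_instance

def pvDiffWitness_newrow : List String × Int := (["a", "B"], -1)
def pvDiffWitnessOut_newrow : (List String) × (List String) :=
  (["a", "\n", "\n", "B", "\n", "B"], ["a", "\n", "B"])

-- ===== CLAIM (what is proved, stated in full; the proofs are below) =====
def Claim_unchanged_newrow : Prop := ∀ (lst : List String) (pos : Int),
  Dom_newrow lst pos → Pre_newrow lst pos → Spec_newrow lst pos (newrow lst pos)
def Claim_changed_newrow : Prop :=
  Dom_newrow (pvDiffWitness_newrow.1) (pvDiffWitness_newrow.2) ∧
  Pre_newrow (pvDiffWitness_newrow.1) (pvDiffWitness_newrow.2) ∧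
  D_newrow (pvDiffWitness_newrow.1) (pvDiffWitness_newrow.2) ∧
  newrow (pvDiffWitness_newrow.1) (pvDiffWitness_newrow.2) = pvDiffWitnessOut_newrow.1 ∧
  newrow_alt (pvDiffWitness_newrow.1) (pvDiffWitness_newrow.2) = pvDiffWitnessOut_newrow.2 ∧
  pvDiffWitnessOut_newrow.1 ≠ pvDiffWitnessOut_newrow.2
def Claim_exact_newrow : Prop := ∀ (lst : List String) (pos : Int),
  Dom_newrow lst pos → Pre_newrow lst pos → D_newrow lst pos →
  newrow lst pos ≠ newrow_alt lst pos

-- ===== LEMMAS AND PROOFS =====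

-- number of title strings in a list (proof-side helper for the length accounting)
def countT (l : List String) : Nat := l.countP (fun s => isTitleO s == some true)

lemma isTitleO_some {s : String} (h : s ≠ "") :
    isTitleO s = some true ∨ isTitleO s = some false := by
  unfold isTitleO
  cases hc : PySem.Str.pyGet? s 0 with
  | none =>
    exfalso
    have hl : s.toList ≠ [] := by intro hn; apply h; cases s; simp_all
    simp only [pysem] at hc
    cases hx : s.toList with
    | nil => exact hl hx
    | cons a t => rw [hx] at hc; simp at hc
  | some c0 => simp only []; split_ifs <;> simp

lemma pySplice_nonneg (lst : List String) (pos : Int) (v : List String)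
    (h0 : 0 ≤ pos) (h1 : pos < (lst.length : Int)) :
    pySplice lst pos v = lst.take pos.toNat ++ v ++ lst.drop (pos.toNat + 1) := by
  have e1 : spliceLo lst.length pos = pos.toNat := by unfold spliceLo; split_ifs <;> omega
  have e2 : spliceHi lst.length pos = pos.toNat + 1 := by
    unfold spliceHi; rw [e1]; split_ifs <;> omega
  rw [pySplice, e1, e2]

-- A's loop, started at a non-negative pos with no empty string in scope, computes
-- head ++ flat chunks of the tail.
lemma newrowLoop_nonneg (fuel : Nat) : ∀ (lst : List String) (pos : Int), 0 ≤ pos →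
    lst.length ≤ pos.toNat + fuel →
    (∀ s ∈ lst.drop pos.toNat, s ≠ "") →
    newrowLoop fuel lst pos = lst.take pos.toNat ++ (lst.drop pos.toNat).flatMap titleChunk := by
  induction fuel with
  | zero =>
    intro lst pos h0 hf _
    have hge : lst.length ≤ pos.toNat := by omega
    have hd : lst.drop pos.toNat = [] := List.drop_eq_nil_of_le hge
    simp [newrowLoop, hd, List.take_of_length_le hge]
  | succ fuel ih =>
    intro lst pos h0 hf hne
    by_cases hlt : pos < (lst.length : Int)
    · have hp : pos.toNat < lst.length := by omega
      have hget : PySem.List.pyGet? lst pos = some lst[pos.toNat] := by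
        rw [PySem.List.pyGet?_of_nonneg _ h0]
        exact List.getElem?_eq_getElem hp
      have hdropc : lst.drop pos.toNat = lst[pos.toNat] :: lst.drop (pos.toNat + 1) :=
        List.drop_eq_getElem_cons hp
      have hmem : lst[pos.toNat] ∈ lst.drop pos.toNat := by
        rw [hdropc]; exact List.mem_cons_self
      have hsne : lst[pos.toNat] ≠ "" := hne _ hmem
      rcases isTitleO_some hsne with ht | ht
      · rw [newrowLoop]
        simp only [hlt, if_pos, hget, ht]
        set s := lst[pos.toNat] with hs
        rw [pySplice_nonneg lst pos ["\n", s] h0 hlt]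
        have ht2 : (pos + 2).toNat = pos.toNat + 2 := by omega
        have hlen : (lst.take pos.toNat).length = pos.toNat := by
          simp [List.length_take, Nat.min_eq_left (Nat.le_of_lt hp)]
        have hsplit : pos.toNat + 2 = (lst.take pos.toNat).length + 2 := by rw [hlen]
        have hdrop2 : (lst.take pos.toNat ++ ["\n", s] ++ lst.drop (pos.toNat + 1)).drop (pos.toNat + 2)
            = lst.drop (pos.toNat + 1) := by
          rw [List.append_assoc, hsplit, List.drop_length_add_append]; simp
        have htake2 : (lst.take pos.toNat ++ ["\n", s] ++ lst.drop (pos.toNat + 1)).take (pos.toNat + 2)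
            = lst.take pos.toNat ++ ["\n", s] := by
          rw [List.append_assoc, hsplit, List.take_length_add_append]; simp
        rw [ih _ (pos + 2) (by omega) (by simp [ht2]; omega)
              (by rw [ht2, hdrop2]; intro x hx
                  exact hne x (by rw [hdropc]; exact List.mem_cons_of_mem _ hx))]
        have hc : titleChunk lst[pos.toNat] = ["\n", lst[pos.toNat]] := by
          unfold titleChunk; rw [ht]
        rw [ht2, hdrop2, htake2, hdropc, List.flatMap_cons, hc, List.append_assoc]
      · rw [newrowLoop]
        simp only [hlt, if_pos, hget, ht]
        have ht1 : (pos + 1).toNat = pos.toNat + 1 := by omega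
        rw [ih lst (pos + 1) (by omega) (by omega)
              (by rw [ht1]; intro x hx
                  exact hne x (by rw [hdropc]; exact List.mem_cons_of_mem _ hx))]
        have hc : titleChunk lst[pos.toNat] = [lst[pos.toNat]] := by
          unfold titleChunk; rw [ht]
        rw [ht1, List.take_succ_eq_append_getElem hp, hdropc, List.flatMap_cons, hc,
            List.append_assoc]
    · have hge : lst.length ≤ pos.toNat := by omega
      have hd : lst.drop pos.toNat = [] := List.drop_eq_nil_of_le hge
      rw [newrowLoop]
      simp [hlt, hd, List.take_of_length_le hge]

-- with no title anywhere (and nothing empty), A's loop is the identity for any start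
lemma newrowLoop_notitle (fuel : Nat) : ∀ (lst : List String) (pos : Int),
    -(lst.length : Int) ≤ pos → (lst.length : Int) ≤ pos + fuel →
    (∀ s ∈ lst, isTitleO s = some false) →
    newrowLoop fuel lst pos = lst := by
  induction fuel with
  | zero => intro lst pos _ _ _; rfl
  | succ fuel ih =>
    intro lst pos hlb hub hall
    by_cases hlt : pos < (lst.length : Int)
    · cases hg : PySem.List.pyGet? lst pos with
      | none =>
        exfalso
        rw [PySem.List.pyGet?_eq_none_iff] at hg
        exact hg (by simp [PySem.Raise.InRange]; omega)
      | some s =>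
        have hs : s ∈ lst := PySem.List.mem_of_pyGet?_eq_some _ hg
        rw [newrowLoop]
        simp only [hlt, if_pos, hg, hall s hs]
        exact ih lst (pos + 1) (by omega) (by omega) hall
    · rw [newrowLoop]; simp [hlt]

lemma flatMap_titleChunk_id {l : List String} (h : ∀ s ∈ l, isTitleO s = some false) :
    l.flatMap titleChunk = l := by
  induction l with
  | nil => simp
  | cons a t ih =>
    have ha := h a (by simp)
    simp [titleChunk, ha, ih (fun s hs => h s (by simp [hs]))]


lemma isTitleO_nl : isTitleO "\n" = some false := by decide

lemma countT_append (a b : List String) : countT (a ++ b) = countT a + countT b := by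
  simp [countT, List.countP_append]

lemma countT_cons (x : String) (l : List String) :
    countT (x :: l) = (if isTitleO x = some true then 1 else 0) + countT l := by
  unfold countT
  rw [List.countP_cons]
  simp only [beq_iff_eq]
  split_ifs <;> omega

lemma len_flatMap_titleChunk (l : List String) :
    (l.flatMap titleChunk).length = l.length + countT l := by
  induction l with
  | nil => simp [countT]
  | cons x t ih =>
    rw [List.flatMap_cons, List.length_append, ih, countT_cons]
    rcases hx : isTitleO x with _ | b
    · simp [titleChunk, hx]; omega
    · cases b <;> simp [titleChunk, hx] <;> omega

lemma countT_drop_one (l : List String) : countT l ≤ countT (l.drop 1) + 1 := by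
  cases l with
  | nil => simp [countT]
  | cons x t => rw [countT_cons]; simp; split_ifs <;> omega

lemma pySplice_neg (lst : List String) (pos : Int) (v : List String)
    (h2 : pos ≤ -2) (hl : -(lst.length : Int) ≤ pos) :
    pySplice lst pos v
      = lst.take ((lst.length : Int) + pos).toNat ++ v
          ++ lst.drop (((lst.length : Int) + pos).toNat + 1) := by
  have e1 : spliceLo lst.length pos = ((lst.length : Int) + pos).toNat := by
    unfold spliceLo; split_ifs <;> omega
  have e2 : spliceHi lst.length pos = ((lst.length : Int) + pos).toNat + 1 := by
    unfold spliceHi; rw [e1]; split_ifs <;> omega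
  rw [pySplice, e1, e2]

lemma pySplice_neg_one (lst : List String) (v : List String) (h : 1 ≤ lst.length) :
    pySplice lst (-1) v = lst.take (lst.length - 1) ++ v ++ lst.drop (lst.length - 1) := by
  have e1 : spliceLo lst.length (-1) = lst.length - 1 := by
    unfold spliceLo; split_ifs <;> omega
  have e2 : spliceHi lst.length (-1) = lst.length - 1 := by
    unfold spliceHi; rw [e1]; split_ifs <;> omega
  rw [pySplice, e1, e2]

-- the negative-index phase of A's loop: it ends in a start state (M, p) for the
-- non-negative phase, never loses a title, and either did nothing at all (then the
-- scanned suffix had no title) or strictly grew the list.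
lemma newrowLoop_neg (fuel : Nat) : ∀ (lst : List String) (pos : Int),
    pos < 0 → -(lst.length : Int) ≤ pos →
    (lst.length : Int) + 1 ≤ pos + fuel →
    (∀ s ∈ lst, s ≠ "") →
    ∃ (M : List String) (p : Nat), p ≤ M.length ∧
      newrowLoop fuel lst pos = M.take p ++ (M.drop p).flatMap titleChunk ∧
      countT lst ≤ countT (M.drop p) ∧
      ((M = lst ∧ p = 0 ∧ countT (lst.drop (lst.length - (-pos).toNat)) = 0) ∨
        lst.length + 1 ≤ M.length) := by
  induction fuel with
  | zero => intro lst pos h1 _ h3 _; exfalso; omega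
  | succ fuel ih =>
    intro lst pos h1 h2 h3 hne
    have hn1 : 1 ≤ lst.length := by omega
    have hlt : pos < (lst.length : Int) := by omega
    have hk1 : 0 < (-pos).toNat := by omega
    have hkn : (-pos).toNat ≤ lst.length := by omega
    set i := lst.length - (-pos).toNat with hidef
    have hidx : i < lst.length := by omega
    have hget : PySem.List.pyGet? lst pos = some lst[i] := by
      conv_lhs => rw [show pos = -(((-pos).toNat : Nat) : Int) by omega]
      rw [PySem.List.pyGet?_neg_natCast _ _ hk1 hkn]
      exact List.getElem?_eq_getElem hidx
    have hsmem : lst[i] ∈ lst := List.getElem_mem _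
    have hsne : lst[i] ≠ "" := hne _ hsmem
    have hdropc : lst.drop i = lst[i] :: lst.drop (i + 1) :=
      List.drop_eq_getElem_cons hidx
    rcases isTitleO_some hsne with ht | ht
    · -- title hit
      rw [newrowLoop]
      simp only [hlt, if_pos, hget, ht]
      by_cases hk2 : (-pos).toNat = 1
      · -- pos = -1: pure insertion before the last element, then scan from index 1
        have hpos1 : pos = -1 := by omega
        have hi1 : i = lst.length - 1 := by omega
        have hdrop1 : lst.drop i = [lst[i]] := by
          rw [hdropc, show i + 1 = lst.length by omega]
          simp
        rw [hpos1, pySplice_neg_one lst _ hn1, ← hi1]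
        set M₁ := lst.take i ++ ["\n", lst[i]] ++ lst.drop i with hM₁
        have htl : (lst.take i).length = i := by simp [List.length_take]; omega
        have hM₁len : M₁.length = lst.length + 2 := by
          simp [hM₁, List.length_append, List.length_take, List.length_drop]; omega
        have hM₁ne : ∀ x ∈ M₁, x ≠ "" := by
          intro x hx
          simp only [hM₁, List.mem_append, List.mem_cons, List.not_mem_nil, or_false] at hx
          rcases hx with (hx | hx | hx) | hx
          · exact hne _ (List.mem_of_mem_take hx)
          · subst hx; decide
          · subst hx; exact hsne
          · exact hne _ (List.mem_of_mem_drop hx)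
        refine ⟨M₁, 1, by omega, ?_, ?_, Or.inr (by omega)⟩
        · rw [show (-1 : Int) + 2 = 1 by norm_num]
          rw [newrowLoop_nonneg fuel M₁ 1 (by omega) (by rw [hM₁len]; omega)
                (fun x hx => hM₁ne x (List.mem_of_mem_drop hx))]
          norm_num
        · have hnl : countT ["\n", lst[i]] = 1 := by
            rw [show (["\n", lst[i]] : List String) = "\n" :: lst[i] :: [] from rfl,
                countT_cons, countT_cons, isTitleO_nl, if_pos ht]
            simp [countT]
          have h1c : countT M₁ = countT (lst.take i) + 1 + countT (lst.drop i) := by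
            rw [hM₁, countT_append, countT_append, hnl]
          have h2c : countT lst = countT (lst.take i) + countT (lst.drop i) := by
            conv_lhs => rw [← List.take_append_drop i lst]
            rw [countT_append]
          have h3c := countT_drop_one M₁
          omega
      · -- pos ≤ -2: the hit element is replaced by ["\n", element]; length grows by one
        have hple : pos ≤ -2 := by omega
        rw [pySplice_neg lst pos _ hple h2,
            show ((lst.length : Int) + pos).toNat = i by omega]
        set M' := lst.take i ++ ["\n", lst[i]] ++ lst.drop (i + 1) with hM'
        have hM'len : M'.length = lst.length + 1 := by
          simp [hM']
        have hnl : countT ["\n", lst[i]] = 1 := by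
          rw [show (["\n", lst[i]] : List String) = "\n" :: lst[i] :: [] from rfl,
              countT_cons, countT_cons, isTitleO_nl, if_pos ht]
          simp [countT]
        have hM'cnt : countT M' = countT lst := by
          have h1c : countT M' = countT (lst.take i) + 1 + countT (lst.drop (i + 1)) := by
            rw [hM', countT_append, countT_append, hnl]
          have h2c : countT lst = countT (lst.take i) + (1 + countT (lst.drop (i + 1))) := by
            conv_lhs => rw [← List.take_append_drop i lst]
            rw [countT_append, hdropc, countT_cons, if_pos ht]
          omega
        have hM'ne : ∀ x ∈ M', x ≠ "" := by
          intro x hx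
          simp only [hM', List.mem_append, List.mem_cons, List.not_mem_nil, or_false] at hx
          rcases hx with (hx | hx | hx) | hx
          · exact hne _ (List.mem_of_mem_take hx)
          · subst hx; decide
          · subst hx; exact hsne
          · exact hne _ (List.mem_of_mem_drop hx)
        by_cases hz : pos + 2 = 0
        · -- the loop exits the negative phase at index 0
          rw [hz, newrowLoop_nonneg fuel M' 0 (by omega) (by rw [hM'len]; simp; omega)
                (fun x hx => hM'ne x (List.mem_of_mem_drop hx))]
          refine ⟨M', 0, by omega, by norm_num, ?_, Or.inr (by omega)⟩
          simp [hM'cnt]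
        · -- still negative: continue by induction
          obtain ⟨M, p, hpl, hres, hcnt, hbr⟩ :=
            ih M' (pos + 2) (by omega) (by rw [hM'len]; push_cast; omega)
              (by rw [hM'len]; push_cast; omega) hM'ne
          refine ⟨M, p, hpl, hres, by rw [← hM'cnt]; exact hcnt, Or.inr ?_⟩
          rcases hbr with ⟨hMeq, _, _⟩ | hgrow
          · rw [hMeq, hM'len]
          · omega
    · -- not a title: step to pos + 1
      rw [newrowLoop]
      simp only [hlt, if_pos, hget, ht]
      by_cases hk2 : (-pos).toNat = 1
      · -- pos = -1: exit the negative phase at index 0 with nothing changed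
        have hpos1 : pos = -1 := by omega
        rw [hpos1, show (-1 : Int) + 1 = 0 by norm_num,
            newrowLoop_nonneg fuel lst 0 (by omega) (by simp; omega)
              (fun x hx => hne x (List.mem_of_mem_drop hx))]
        refine ⟨lst, 0, by omega, by norm_num, by simp, Or.inl ⟨rfl, rfl, ?_⟩⟩
        rw [hdropc, countT_cons, if_neg (by simp [ht]),
            show i + 1 = lst.length by omega]
        simp [countT]
      · -- pos ≤ -2: continue by induction
        obtain ⟨M, p, hpl, hres, hcnt, hbr⟩ :=
          ih lst (pos + 1) (by omega) (by omega) (by omega) hne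
        refine ⟨M, p, hpl, hres, hcnt, ?_⟩
        rcases hbr with ⟨hMeq, hp0, hsuf⟩ | hgrow
        · refine Or.inl ⟨hMeq, hp0, ?_⟩
          rw [hdropc, countT_cons, if_neg (by simp [ht])] at *
          rw [show i + 1 = lst.length - (-(pos + 1)).toNat by omega] at *
          omega
        · exact Or.inr hgrow

-- ===== VERDICT (by name: the statement is the Claim_ definition above) =====
theorem newrow_spec : Claim_unchanged_newrow := by
  intro lst pos _hdom hpre hD
  by_cases hneg : pos < 0
  · rw [Pre_newrow, if_pos hneg] at hpre
    obtain ⟨hnil, hlb, hall⟩ := hpre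
    have hall' : ∀ s ∈ lst, isTitleO s = some false := by
      intro s hs
      rcases isTitleO_some (hall s hs) with ht | ht
      · exact absurd ⟨hneg, s, hs, ht⟩ hD
      · exact ht
    rw [newrow, newrowLoop_notitle _ lst pos hlb (by omega) hall']
    rw [newrow_alt]
    have hkpos : 0 < (-pos).toNat := by omega
    have hpos : pos = -(((-pos).toNat : Nat) : Int) := by omega
    rw [hpos, PySem.List.slice_to_neg_natCast lst _ hkpos,
        PySem.List.slice_from_neg_natCast lst _ hkpos]
    rw [flatMap_titleChunk_id (fun s hs => hall' s (List.mem_of_mem_drop hs))]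
    exact (List.take_append_drop _ _).symm
  · have h0 : (0:Int) ≤ pos := by omega
    rw [Pre_newrow, if_neg hneg] at hpre
    rw [newrow, newrowLoop_nonneg _ lst pos h0 (by omega) hpre]
    rw [newrow_alt, PySem.List.slice_to lst h0, PySem.List.slice_from lst h0]

theorem newrow_changed : Claim_changed_newrow := by
  unfold Claim_changed_newrow; decide

theorem newrow_tight : Claim_exact_newrow := by
  intro lst pos _hdom hpre hD heq
  obtain ⟨hneg, t, htmem, htt⟩ := hD
  rw [Pre_newrow, if_pos hneg] at hpre
  obtain ⟨hnil, hlb, hall⟩ := hpre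
  have hk1 : 0 < (-pos).toNat := by omega
  have hkn : (-pos).toNat ≤ lst.length := by omega
  set i := lst.length - (-pos).toNat with hidef
  -- length of B's result: len + titles of the suffix
  have hB : (newrow_alt lst pos).length = lst.length + countT (lst.drop i) := by
    rw [newrow_alt]
    conv_lhs => rw [show pos = -(((-pos).toNat : Nat) : Int) by omega]
    rw [PySem.List.slice_to_neg_natCast _ _ hk1, PySem.List.slice_from_neg_natCast _ _ hk1]
    rw [List.length_append, len_flatMap_titleChunk]
    simp [List.length_take, List.length_drop, ← hidef]
    omega
  -- length of A's result: strictly more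
  have hsufle : countT (lst.drop i) ≤ countT lst := by
    conv_rhs => rw [← List.take_append_drop i lst]
    rw [countT_append]
    omega
  have hT1 : 1 ≤ countT lst := by
    rw [countT]
    refine List.countP_pos_iff.mpr ⟨t, htmem, ?_⟩
    simp [htt]
  have hA : lst.length + countT (lst.drop i) + 1 ≤ (newrow lst pos).length := by
    rw [newrow]
    obtain ⟨M, p, hpl, hres, hcnt, hbr⟩ :=
      newrowLoop_neg (lst.length + pos.natAbs + 2) lst pos hneg hlb (by omega) hall
    rw [hres, List.length_append, len_flatMap_titleChunk]
    have hlt : (M.take p).length = p := by simp [List.length_take]; omega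
    rcases hbr with ⟨hMeq, hp0, hsuf0⟩ | hgrow
    · subst hMeq; subst hp0
      rw [← hidef] at hsuf0
      simp only [List.take_zero, List.drop_zero, List.length_nil] at hcnt ⊢
      omega
    · have : countT (lst.drop i) ≤ countT (M.drop p) := le_trans hsufle hcnt
      simp [List.length_drop] at *
      omega
  rw [heq] at hA
  omega
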